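-- pv_equiv track=rewrite | github.com/meshalmuskan/cipher-tool | cipher_cli.py | format_plaintext
-- ===== SOURCE A (Python) =====
-- def format_plaintext(plaintext):
--     """
--     Prepare the plaintext for Playfair Cipher encryption.
--     It removes non-alphabetic characters and formats it by inserting 'X' between identical letters.
--     If the length is odd, adds an 'X' at the end.
--     """
--     plaintext = plaintext.upper().replace('J', 'I')
--     formatted = ""
--
--     # Create digraphs
--     i = 0
--     while i < len(plaintext):
--         char1 = plaintext[i]
--         if i + 1 < len(plaintext):
--             char2 = plaintext[i + 1]
--             if char1 == char2:  # If identical letters, insert 'X'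
--                 formatted += char1 + 'X'
--                 i += 1
--             else:
--                 formatted += char1 + char2
--                 i += 2
--         else:
--             formatted += char1 + 'X'  # Add 'X' if last character is alone
--             i += 1
--
--     return formatted
-- ===== SOURCE B (Python) =====
-- def format_plaintext(plaintext):
--     """Two staged passes: run-length encode the normalized text, then emit each run's
--     digraph pieces, a run's last letter pairing with (stealing) the next run's first letter."""
--     s = plaintext.upper().replace('J', 'I')
--
--     # Stage 1: run-length encode s into (char, count) pairs.
--     runs = []
--     i = 0
--     n = len(s)
--     while i < n:
--         j = i + 1
--         while j < n and s[j] == s[i]: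
--             j += 1
--         runs.append((s[i], j - i))
--         i = j
--
--     # Stage 2: emit pieces per run.
--     out = []
--     stolen = False
--     for idx, (c, k) in enumerate(runs):
--         m = k - 1 if stolen else k
--         stolen = False
--         if m == 0:
--             continue
--         out.append((c + 'X') * (m - 1))
--         if idx + 1 < len(runs):
--             out.append(c + runs[idx + 1][0])
--             stolen = True
--         else:
--             out.append(c + 'X')
--     return ''.join(out)
-- ===== Notes on version B (the rewrite author's own statement) =====
-- stated objective: faster
-- what changed: Replaces A's single index-stepping scan (i advancing by 1 on a doubled letter, 2 otherwise, with repeated string +=) by two staged passes over different data: run-length encode the normalized text into (char,count) runs, then emit each run's digraph pieces with the run's last letter stealing the next run's first letter, joined once at the end.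
import Mathlib
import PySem

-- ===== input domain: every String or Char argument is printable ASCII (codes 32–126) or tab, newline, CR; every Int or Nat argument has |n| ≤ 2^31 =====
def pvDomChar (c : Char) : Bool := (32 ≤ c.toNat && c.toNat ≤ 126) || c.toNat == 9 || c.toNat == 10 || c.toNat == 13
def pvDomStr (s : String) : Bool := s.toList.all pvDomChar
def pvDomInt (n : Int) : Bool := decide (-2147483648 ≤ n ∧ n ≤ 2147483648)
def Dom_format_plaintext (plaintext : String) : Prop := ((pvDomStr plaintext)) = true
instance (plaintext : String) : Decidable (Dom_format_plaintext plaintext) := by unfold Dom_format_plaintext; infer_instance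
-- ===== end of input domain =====

-- B replaces A's single index-stepping scan by two staged passes: run-length encode the
-- normalized text, then emit digraph pieces per run (a run's last letter steals the next
-- run's first letter), joined once; a timing run measured B faster at large sizes.

-- ===== PORT A =====
-- A's while loop over indices i / i+1 with step 1 or 2, transcribed as the obvious
-- recursion on the remaining suffix of characters (i+1 < len ↔ the suffix has ≥ 2 chars).
def pvLoopA : List Char → List Char
  | [] => []
  | [c] => [c, 'X']
  | c1 :: c2 :: rest =>
      if c1 == c2 then c1 :: 'X' :: pvLoopA (c2 :: rest)
      else c1 :: c2 :: pvLoopA rest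
termination_by l => l.length

def format_plaintext (plaintext : String) : String :=
  String.mk (pvLoopA (PySem.Str.replace (PySem.Str.upper plaintext) "J" "I").toList)

-- ===== PORT B =====
-- Stage 1 of Source B: the outer while loop advances i to j past the run of s[i];
-- the inner while (counting j) is the takeWhile length.
def pvRle : List Char → List (Char × Nat)
  | [] => []
  | c :: t =>
      let k := (t.takeWhile (fun d => d == c)).length
      (c, k + 1) :: pvRle (t.drop k)
termination_by l => l.length
decreasing_by simp

-- Stage 2 of Source B: the for loop over runs carrying the 'stolen' flag; peeking
-- runs[idx+1][0] is peeking the head of the remaining run list.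
def pvEmit : List (Char × Nat) → Bool → List Char
  | [], _ => []
  | (c, k) :: rest, st =>
      let m := if st then k - 1 else k
      if m = 0 then pvEmit rest false
      else
        (List.replicate (m - 1) [c, 'X']).flatten ++
          (match rest with
           | (d, _) :: _ => c :: d :: pvEmit rest true
           | [] => [c, 'X'])

def format_plaintext_alt (plaintext : String) : String :=
  String.mk (pvEmit (pvRle (PySem.Str.replace (PySem.Str.upper plaintext) "J" "I").toList) false)

-- ===== PRECONDITION & SPEC =====
def Spec_format_plaintext (plaintext : String) (out : String) : Prop := out = format_plaintext_alt plaintext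
instance (plaintext : String) (out : String) : Decidable (Spec_format_plaintext plaintext out) := by unfold Spec_format_plaintext; infer_instance

-- ===== CLAIM (what is proved, stated in full; the proofs are below) =====
def Claim_equal_format_plaintext : Prop := ∀ (plaintext : String), Dom_format_plaintext plaintext → Spec_format_plaintext plaintext (format_plaintext plaintext)

-- ===== LEMMAS AND PROOFS =====

theorem pvRle_nil : pvRle [] = [] := by rw [pvRle]

theorem pvRle_cons_eq (c : Char) (u : List Char) :
    pvRle (c :: u) = (c, (u.takeWhile (fun d => d == c)).length + 1)
      :: pvRle (u.drop (u.takeWhile (fun d => d == c)).length) := by rw [pvRle]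

theorem pvRle_cons_cons (c : Char) (u : List Char) :
    pvRle (c :: c :: u) = (c, (u.takeWhile (fun d => d == c)).length + 2)
      :: pvRle (u.drop (u.takeWhile (fun d => d == c)).length) := by
  rw [pvRle_cons_eq]; simp

theorem pvRle_cons_ne (c d : Char) (u : List Char) (h : d ≠ c) :
    pvRle (c :: d :: u) = (c, 1) :: pvRle (d :: u) := by
  rw [pvRle_cons_eq]; simp [h]

theorem pvEmit_nil (st : Bool) : pvEmit [] st = [] := by cases st <;> simp [pvEmit]

-- a stolen run of k+1 behaves exactly as a fresh run of k
theorem pvEmit_steal (c : Char) (k : Nat) (rest : List (Char × Nat)) :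
    pvEmit ((c, k + 1) :: rest) true = pvEmit ((c, k) :: rest) false := by
  simp [pvEmit]

theorem pvEmit_zero (c : Char) (rest : List (Char × Nat)) :
    pvEmit ((c, 0) :: rest) false = pvEmit rest false := by
  simp [pvEmit]

theorem pvEmit_last (c : Char) : pvEmit [(c, 1)] false = [c, 'X'] := by
  simp [pvEmit]

-- a spent run (m = 1) pairs its letter with the next run's head and marks it stolen
theorem pvEmit_pair (c d : Char) (k : Nat) (rest : List (Char × Nat)) :
    pvEmit ((c, 1) :: (d, k) :: rest) false = c :: d :: pvEmit ((d, k) :: rest) true := by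
  simp [pvEmit]

-- unfolding one 'cX' piece from a run with m ≥ 2
theorem pvEmit_unfold (c : Char) (k : Nat) (rest : List (Char × Nat)) (hk : 1 ≤ k) :
    pvEmit ((c, k + 1) :: rest) false = c :: 'X' :: pvEmit ((c, k) :: rest) false := by
  obtain ⟨k', rfl⟩ : ∃ k', k = k' + 1 := ⟨k - 1, by omega⟩
  simp [pvEmit, List.replicate_succ]

-- main invariant: emitting the runs of s fresh is A's loop on s; emitting the runs of
-- c :: u with the first letter already stolen is A's loop on u.
theorem pvMain : ∀ (n : Nat) (s : List Char), s.length ≤ n →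
    pvEmit (pvRle s) false = pvLoopA s ∧
    (∀ c u, s = c :: u → pvEmit (pvRle s) true = pvLoopA u) := by
  intro n
  induction n with
  | zero =>
      intro s hs
      have : s = [] := List.eq_nil_of_length_eq_zero (by omega)
      subst this
      exact ⟨by rw [pvRle_nil, pvEmit_nil]; simp [pvLoopA], by intro c u h; cases h⟩
  | succ n ih =>
      intro s hs
      match s with
      | [] => exact ⟨by rw [pvRle_nil, pvEmit_nil]; simp [pvLoopA], by intro c u h; cases h⟩
      | c :: u =>
        have hu : u.length ≤ n := by simpa using hs
        constructor
        · -- fresh case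
          match u with
          | [] =>
              rw [pvRle_cons_eq]
              simp only [List.takeWhile_nil, List.length_nil, List.drop_nil, pvRle_nil]
              rw [pvEmit_last]; simp [pvLoopA]
          | c' :: u2 =>
            by_cases hcc : c' = c
            · subst hcc
              rw [pvRle_cons_cons, pvEmit_unfold _ _ _ (by omega), ← pvRle_cons_eq,
                (ih (c' :: u2) hu).1]
              simp [pvLoopA]
            · rw [pvRle_cons_ne c c' u2 hcc]
              have h2 := pvRle_cons_eq c' u2
              have htrue := (ih (c' :: u2) hu).2 c' u2 rfl
              rw [h2, pvEmit_pair, ← h2, htrue]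
              have hbe : (c == c') = false := by
                simp only [beq_eq_false_iff_ne]; exact fun h => hcc h.symm
              simp [pvLoopA, hbe]
        · -- stolen case
          intro c u0 heq
          injection heq with h1 h2
          subst h1; subst h2
          match u with
          | [] =>
              rw [pvRle_cons_eq]
              simp only [List.takeWhile_nil, List.length_nil, List.drop_nil, pvRle_nil]
              rw [pvEmit_steal, pvEmit_zero, pvEmit_nil]; simp [pvLoopA]
          | d :: u2 =>
            by_cases hd : d = c
            · subst hd
              rw [pvRle_cons_cons]
              have : ((List.takeWhile (fun x => x == d) u2).length + 2)
                  = ((List.takeWhile (fun x => x == d) u2).length + 1) + 1 := rfl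
              rw [this, pvEmit_steal, ← pvRle_cons_eq]
              exact (ih (d :: u2) hu).1
            · rw [pvRle_cons_ne c d u2 hd]
              rw [show (1 : Nat) = 0 + 1 from rfl, pvEmit_steal, pvEmit_zero]
              exact (ih (d :: u2) hu).1

-- ===== VERDICT (by name: the statement is the Claim_ definition above) =====
theorem format_plaintext_spec : Claim_equal_format_plaintext := by
  intro p _
  unfold Spec_format_plaintext format_plaintext format_plaintext_alt
  rw [(pvMain _ _ (le_refl _)).1]
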